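-- pv_equiv track=rewrite | github.com/daniel-reich/turbo-robot | WH8AfHodqyj4gSB8K_17.py | is_authentic_skewer
-- ===== SOURCE A (Python) =====
-- from collections import Counter
--
-- def is_authentic_skewer(n):
--   v=["A","E","I","O","U"]
--   z=n.replace("-","")
--   if(len(z)<2):
--     return False
--   i=0
--   step=list()
--   c=0
--   i=0
--   while(i<len(n)):
--     if((i==0 or i==len(n)-1) and n[i] in v):
--       return False
--     elif(n[i]=='-'):
--       j=i
--       while(j<len(n) and n[j]=='-'):
--         j+=1
--       step.append(j-i)
--       i=j
--     elif(c==0 and n[i] not in v):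
--       c=1
--       i+=1
--     elif(c==1 and n[i] in v):
--       c=0
--       i+=1
--     elif(c==0 and n[i] in v):
--       return False
--     elif(c==1 and n[i] not in v):
--       return False
--   if(len(Counter(step))!=1):
--     return False
--   return True
-- ===== SOURCE B (Python) =====
-- from itertools import groupby
--
-- def is_authentic_skewer(n):
--     vowels = set("AEIOU")
--     z = n.replace("-", "")
--     if len(z) < 2:
--         return False
--     if n[0] in vowels or n[-1] in vowels:
--         return False
--     if any((ch in vowels) != (i % 2 == 1) for i, ch in enumerate(z)):
--         return False
--     runs = [sum(1 for _ in g) for is_dash, g in groupby(n, key=lambda c: c == '-') if is_dash]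
--     return len(set(runs)) == 1
-- ===== Notes on version B (the rewrite author's own statement) =====
-- stated objective: alternative
-- what changed: Replaces A's single-pass index state machine (parity flag, manual inner dash-run scan, Counter) with a decomposed pipeline: strip dashes, reject a vowel first/last char, check vowel alternation by index parity over enumerate, and compare groupby dash-run lengths via a set.
import Mathlib
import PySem

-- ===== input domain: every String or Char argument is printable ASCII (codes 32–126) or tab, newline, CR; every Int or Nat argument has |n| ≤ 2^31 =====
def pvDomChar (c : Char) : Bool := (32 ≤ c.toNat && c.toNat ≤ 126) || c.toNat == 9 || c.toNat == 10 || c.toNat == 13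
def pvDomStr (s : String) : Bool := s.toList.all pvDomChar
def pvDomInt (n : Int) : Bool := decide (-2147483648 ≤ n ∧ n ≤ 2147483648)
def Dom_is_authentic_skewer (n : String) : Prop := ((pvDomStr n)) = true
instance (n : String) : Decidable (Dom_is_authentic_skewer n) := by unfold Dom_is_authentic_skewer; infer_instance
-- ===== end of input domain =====

-- B replaces A's single-pass index state machine by a decomposed pipeline (strip dashes, boundary
-- check, parity alternation over enumerate, groupby run lengths into a set); same behaviour, same cost.


-- ===== PORT A =====
-- v = ["A","E","I","O","U"]
def vA : List Char := ['A', 'E', 'I', 'O', 'U']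

-- the inner while: j advanced while j < len(n) and n[j] == '-'
def dashEnd (s : List Char) (j : Nat) : Nat :=
  if h : j < s.length then
    if s[j] = '-' then dashEnd s (j + 1) else j
  else j
termination_by s.length - j

theorem dashEnd_ge (s : List Char) (j : Nat) : j ≤ dashEnd s j := by
  fun_induction dashEnd s j <;> omega

theorem dashEnd_gt (s : List Char) (j : Nat) (h : j < s.length) (hd : s[j] = '-') :
    j < dashEnd s j := by
  unfold dashEnd
  rw [dif_pos h, if_pos hd]
  exact Nat.lt_of_lt_of_le (Nat.lt_succ_self j) (dashEnd_ge s (j + 1))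

-- the outer while loop: i the index, c the parity flag, step the collected dash-run lengths;
-- none = an early 'return False', some step = the loop ran to completion
def loopA (s : List Char) (i c : Nat) (step : List Nat) : Option (List Nat) :=
  if h : i < s.length then
    if (i = 0 ∨ i = s.length - 1) ∧ s[i] ∈ vA then none
    else if hd : s[i] = '-' then
      loopA s (dashEnd s i) c (step ++ [dashEnd s i - i])
    else if c = 0 ∧ s[i] ∉ vA then loopA s (i + 1) 1 step
    else if c = 1 ∧ s[i] ∈ vA then loopA s (i + 1) 0 step
    else none
  else some step
termination_by s.length - i
decreasing_by
  · have := dashEnd_gt s i h hd; omega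
  · omega
  · omega

-- z = n.replace("-", ""): removing each single '-' is exactly filtering the char list (exact)
def is_authentic_skewer (n : String) : Bool :=
  if ((n.toList).filter (fun ch => ch ≠ '-')).length < 2 then false
  else
    match loopA n.toList 0 0 [] with
    | none => false
    | some step => decide ((PySem.Dict.counter step).size = 1)  -- len(Counter(step)) != 1 → False, else True

-- ===== PORT B =====
def vB : List Char := ['A', 'E', 'I', 'O', 'U']

-- dash-run lengths: itertools.groupby(n, key=lambda c: c=='-') keeping the True groups (exact)
def dashRuns (s : List Char) : List Nat :=
  match s with
  | [] => []
  | ch :: t =>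
    if ch = '-' then
      ((t.takeWhile (fun x => x = '-')).length + 1) :: dashRuns (t.dropWhile (fun x => x = '-'))
    else dashRuns t
termination_by s.length
decreasing_by
  · have := List.length_dropWhile_le (fun x => decide (x = '-')) t
    simp only [List.length_cons]; omega
  · simp

-- z = n.replace("-", ""): removing each single '-' is exactly filtering the char list (exact)
def is_authentic_skewer_alt (n : String) : Bool :=
  if ((n.toList).filter (fun ch => ch ≠ '-')).length < 2 then false
  else if (n.toList).headD ' ' ∈ vB || (n.toList).getLastD ' ' ∈ vB then false  -- n[0], n[-1]: the list is nonempty here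
  else if (PySem.List.enumerate ((n.toList).filter (fun ch => ch ≠ '-')) 0).any
      (fun p => decide (p.2 ∈ vB) != decide (PySem.Int.mod p.1 2 = 1)) then false
  else decide ((PySem.Set.ofList (dashRuns n.toList)).length = 1)  -- len(set(runs)) == 1

-- ===== PRECONDITION & SPEC =====
def Spec_is_authentic_skewer (n : String) (out : Bool) : Prop := out = is_authentic_skewer_alt n
instance (n : String) (out : Bool) : Decidable (Spec_is_authentic_skewer n out) := by unfold Spec_is_authentic_skewer; infer_instance

-- ===== CLAIM (what is proved, stated in full; the proofs are below) =====
def Claim_equal_is_authentic_skewer : Prop := ∀ (n : String), Dom_is_authentic_skewer n → Spec_is_authentic_skewer n (is_authentic_skewer n)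

-- ===== LEMMAS AND PROOFS =====

-- does the last character (n[-1]) belong to the vowel list?
def vLast (s : List Char) : Bool := s.getLastD ' ' ∈ vA

-- the loop's alternation automaton on the dash-free characters, started with flag c
def altFail : List Char → Nat → Bool
  | [], _ => false
  | ch :: t, c =>
    if c = 0 then (if ch ∈ vA then true else altFail t 1)
    else (if ch ∈ vA then altFail t 0 else true)

theorem drop_length_takeWhile (p : Char → Bool) (l : List Char) :
    l.drop (l.takeWhile p).length = l.dropWhile p := by
  induction l with
  | nil => rfl
  | cons a t ih =>
    by_cases h : p a
    · simpa [h] using ih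
    · simp [h]

theorem dashEnd_eq (s : List Char) (j : Nat) :
    dashEnd s j = j + ((s.drop j).takeWhile (fun x => x = '-')).length := by
  fun_induction dashEnd s j with
  | case1 j h hd ih =>
    rw [List.drop_eq_getElem_cons h, List.takeWhile_cons]
    simp only [hd, decide_true, if_true, List.length_cons]
    omega
  | case2 j h hd =>
    rw [List.drop_eq_getElem_cons h]
    simp [hd]
  | case3 j h =>
    rw [List.drop_eq_nil_of_le (by omega)]
    simp

theorem dashEnd_le (s : List Char) (j : Nat) (h : j ≤ s.length) : dashEnd s j ≤ s.length := by
  rw [dashEnd_eq]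
  have h1 : ((s.drop j).takeWhile (fun x => x = '-')).length ≤ (s.drop j).length :=
    (List.takeWhile_prefix _).length_le
  have h2 : (s.drop j).length = s.length - j := List.length_drop ..
  omega

theorem drop_dashEnd (s : List Char) (j : Nat) :
    s.drop (dashEnd s j) = (s.drop j).dropWhile (fun x => x = '-') := by
  rw [dashEnd_eq, ← drop_length_takeWhile (fun x => decide (x = '-')) (s.drop j),
    List.drop_drop]

theorem filter_dropWhile (l : List Char) :
    (l.dropWhile (fun x => x = '-')).filter (fun ch => ch ≠ '-') = l.filter (fun ch => ch ≠ '-') := by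
  induction l with
  | nil => rfl
  | cons a t ih =>
    by_cases h : a = '-'
    · simpa [List.dropWhile_cons, h] using ih
    · simp [h]

theorem getLastD_eq (l : List Char) (d : Char) (h : l ≠ []) :
    l.getLastD d = l[l.length - 1]'(by cases l with | nil => simp at h | cons a t => simp) := by
  cases l with
  | nil => simp at h
  | cons a t =>
    rw [List.getLastD_eq_getLast?, List.getLast?_eq_getElem?]
    simp
    rfl

-- if everything from index j on is a dash, the last character is a dash
theorem vLast_false_of_all_dash (s : List Char) (j : Nat) (hj : j < s.length)
    (hall : ∀ x ∈ s.drop j, x = '-') : vLast s = false := by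
  have hne : s ≠ [] := by cases s with | nil => simp at hj | cons a t => simp
  have hlast : s[s.length - 1]'(by omega) = '-' := by
    have hmem : s[s.length - 1]'(by omega) ∈ s.drop j := by
      have : (s.drop j)[s.length - 1 - j]'(by simp [List.length_drop]; omega) =
          s[s.length - 1]'(by omega) := by
        rw [List.getElem_drop]; congr 1; omega
      rw [← this]; exact List.getElem_mem _
    exact hall _ hmem
  unfold vLast
  rw [getLastD_eq s ' ' hne, hlast]
  decide

-- the main loop invariant: from any interior index, the loop fails iff the alternation automaton
-- fails on the remaining dash-free characters or the last character is a vowel; otherwise it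
-- appends the remaining dash-run lengths
theorem loopA_spec (s : List Char) (i c : Nat) (acc : List Nat) :
    0 < i → c ≤ 1 →
    loopA s i c acc =
      if altFail ((s.drop i).filter (fun ch => ch ≠ '-')) c || (vLast s && decide (i < s.length))
      then none else some (acc ++ dashRuns (s.drop i)) := by
  fun_induction loopA s i c acc with
  | case1 i c acc h hb =>
    -- boundary vowel: 0 < i forces i = s.length - 1, so the last char is a vowel
    intro hi _
    obtain ⟨hio, hv⟩ := hb
    have hilast : i = s.length - 1 := by omega
    have : vLast s = true := by
      unfold vLast
      rw [getLastD_eq s ' ' (by cases s with | nil => simp at h | cons a t => simp)]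
      simp only [← hilast]
      simpa using hv
    simp [this, h]
  | case2 i c acc h hb hd ih =>
    intro hi hc
    have hgt := dashEnd_gt s i h hd
    rw [ih (by omega) hc]
    have hle := dashEnd_le s i (by omega)
    -- the dropped characters are dashes: same dash-free remainder
    have hfilt : (s.drop (dashEnd s i)).filter (fun ch => ch ≠ '-') =
        (s.drop i).filter (fun ch => ch ≠ '-') := by
      rw [drop_dashEnd]; exact filter_dropWhile _
    -- the run just collected ++ the remaining runs = the runs from i
    have hruns : dashRuns (s.drop i) = (dashEnd s i - i) :: dashRuns (s.drop (dashEnd s i)) := by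
      rw [List.drop_eq_getElem_cons h]
      have : dashRuns (s[i] :: s.drop (i + 1)) =
          (((s.drop (i + 1)).takeWhile (fun x => x = '-')).length + 1) ::
            dashRuns ((s.drop (i + 1)).dropWhile (fun x => x = '-')) := by
        rw [dashRuns]; simp [hd]
      rw [this]
      congr 1
      · rw [dashEnd_eq s i, List.drop_eq_getElem_cons h]
        simp [hd]
      · rw [drop_dashEnd, List.drop_eq_getElem_cons h, List.dropWhile_cons]
        simp [hd]
    have hcond : (vLast s && decide (dashEnd s i < s.length)) =
        (vLast s && decide (i < s.length)) := by
      by_cases hj : dashEnd s i < s.length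
      · simp [hj, h]
      · have hjlen : dashEnd s i = s.length := by omega
        have : vLast s = false := by
          apply vLast_false_of_all_dash s i h
          intro x hx
          have hlen : ((s.drop i).takeWhile (fun x => x = '-')).length = (s.drop i).length := by
            have := dashEnd_eq s i
            have h2 : (s.drop i).length = s.length - i := List.length_drop ..
            have h1 : ((s.drop i).takeWhile (fun x => x = '-')).length ≤ (s.drop i).length :=
              (List.takeWhile_prefix _).length_le
            omega
          have htw : (s.drop i).takeWhile (fun x => x = '-') = s.drop i :=
            (List.takeWhile_prefix _).eq_of_length hlen
          have hx' : x ∈ (s.drop i).takeWhile (fun x => x = '-') := by rw [htw]; exact hx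
          simpa using List.mem_takeWhile_imp hx'
        simp [this]
    rw [hfilt, hcond, hruns]
    simp
  | case3 i c acc h hb hd hcon ih =>
    intro hi hc
    obtain ⟨hc0, hnv⟩ := hcon
    rw [ih (by omega) (by omega)]
    rw [List.drop_eq_getElem_cons h, List.filter_cons]
    have hdd : (decide ¬s[i] = '-') = true := by simpa using hd
    rw [hdd]
    simp only [if_true, hc0]
    have haf : altFail (s[i] :: (s.drop (i + 1)).filter (fun ch => ch ≠ '-')) 0 =
        altFail ((s.drop (i + 1)).filter (fun ch => ch ≠ '-')) 1 := by
      rw [altFail]; simp [hnv]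
    have hruns : dashRuns (s[i] :: s.drop (i + 1)) = dashRuns (s.drop (i + 1)) := by
      rw [dashRuns]; simp [hd]
    have hcond : (vLast s && decide (i + 1 < s.length)) = (vLast s && decide (i < s.length)) := by
      by_cases hj : i + 1 < s.length
      · simp [hj, h]
      · have hij : i = s.length - 1 := by omega
        have : vLast s = false := by
          unfold vLast
          rw [getLastD_eq s ' ' (by cases s with | nil => simp at h | cons a t => simp)]
          simp only [← hij]
          simpa using hnv
        simp [this]
    rw [haf, hcond, hruns]
  | case4 i c acc h hb hd hncon hvow ih =>
    intro hi hc
    obtain ⟨hc1, hv⟩ := hvow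
    rw [ih (by omega) (by omega)]
    rw [List.drop_eq_getElem_cons h, List.filter_cons]
    have hdd : (decide ¬s[i] = '-') = true := by simpa using hd
    rw [hdd]
    simp only [if_true, hc1]
    have haf : altFail (s[i] :: (s.drop (i + 1)).filter (fun ch => ch ≠ '-')) 1 =
        altFail ((s.drop (i + 1)).filter (fun ch => ch ≠ '-')) 0 := by
      rw [altFail]; simp [hv]
    have hlt : i + 1 < s.length := by
      -- i = s.length - 1 with a vowel would have fired the boundary branch
      by_contra hno
      exact hb ⟨Or.inr (by omega), hv⟩
    have hruns : dashRuns (s[i] :: s.drop (i + 1)) = dashRuns (s.drop (i + 1)) := by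
      rw [dashRuns]; simp [hd]
    rw [haf, hruns]
    simp [hlt, h]
  | case5 i c acc h hb hd hncon hnvow =>
    intro hi hc
    have hdd : (decide ¬s[i] = '-') = true := by simpa using hd
    have hAF : altFail ((s.drop i).filter (fun ch => ch ≠ '-')) c = true := by
      rw [List.drop_eq_getElem_cons h, List.filter_cons, if_pos hdd]
      interval_cases c
      · rw [altFail]
        have hv : s[i] ∈ vA := by
          by_contra hn
          exact hncon ⟨rfl, hn⟩
        simp [hv]
      · rw [altFail]
        have hv : s[i] ∉ vA := fun hn => hnvow ⟨rfl, hn⟩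
        simp [hv]
    rw [hAF]
    simp
  | case6 i c acc h =>
    intro hi hc
    rw [List.drop_eq_nil_of_le (by omega)]
    simp [altFail, dashRuns, show ¬ i < s.length from h]

theorem anyCongr {l : List (Int × Char)} {f g : Int × Char → Bool} (h : ∀ p, f p = g p) :
    l.any f = l.any g := by rw [funext h]

-- the automaton equals B's enumerate parity check (generalized over the start index)
theorem altFail_enum (t : List Char) : ∀ (c : Nat) (s0 : Int), c ≤ 1 →
    altFail t c = (PySem.List.enumerate t s0).any
      (fun p => decide (p.2 ∈ vB) != decide (PySem.Int.mod (p.1 + c - s0) 2 = 1)) := by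
  induction t with
  | nil => intro c s0 hc; simp [altFail, PySem.List.enumerate_nil]
  | cons ch t ih =>
    intro c s0 hc
    rw [PySem.List.enumerate_cons, List.any_cons]
    have hmod : ∀ x : Int, PySem.Int.mod x 2 = x % 2 :=
      fun x => PySem.Int.mod_eq_emod_of_pos (by norm_num)
    interval_cases c
    · have hz : (s0, ch).1 + ((0:Nat):Int) - s0 = 0 := by push_cast; ring
      show (if ch ∈ vA then true else altFail t 1) = _
      by_cases hch : ch ∈ vA
      · have hch' : decide (ch ∈ vB) = true := by simpa using hch
        rw [if_pos hch, hz, hch']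
        have hhead : (true != decide (PySem.Int.mod 0 2 = 1)) = true := by decide
        rw [hhead, Bool.true_or]
      · have hch' : decide (ch ∈ vB) = false := by simpa using hch
        rw [if_neg hch, hz, hch', ih 1 (s0 + 1) (by omega)]
        have hhead : (false != decide (PySem.Int.mod 0 2 = 1)) = false := by decide
        rw [hhead, Bool.false_or]
        apply anyCongr
        intro p
        have : p.1 + ((1:Nat):Int) - (s0 + 1) = p.1 + ((0:Nat):Int) - s0 := by push_cast; ring
        rw [this]
    · have hz : (s0, ch).1 + ((1:Nat):Int) - s0 = 1 := by push_cast; ring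
      show (if ch ∈ vA then altFail t 0 else true) = _
      by_cases hch : ch ∈ vA
      · have hch' : decide (ch ∈ vB) = true := by simpa using hch
        rw [if_pos hch, hz, hch', ih 0 (s0 + 1) (by omega)]
        have hhead : (true != decide (PySem.Int.mod 1 2 = 1)) = false := by decide
        rw [hhead, Bool.false_or]
        apply anyCongr
        intro p
        simp only [hmod]
        congr 1
        simp only [decide_eq_decide]
        omega
      · have hch' : decide (ch ∈ vB) = false := by simpa using hch
        rw [if_neg hch, hz, hch']
        have hhead : (false != decide (PySem.Int.mod 1 2 = 1)) = true := by decide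
        rw [hhead, Bool.true_or]

-- len(Counter(l)) counts the distinct elements, exactly len(set(l))
theorem counter_size_eq (l : List Nat) :
    (PySem.Dict.counter l).size = (PySem.Set.ofList l).length := by
  simp [PySem.Dict.size, ← PySem.Dict.keys_counter, PySem.Dict.keys]

-- the whole loop from the start, for strings whose dash-free part has length ≥ 2
theorem loopA_start (s : List Char)
    (hz : ¬ (s.filter (fun ch => ch ≠ '-')).length < 2) :
    loopA s 0 0 [] =
      if altFail (s.filter (fun ch => ch ≠ '-')) 0 || vLast s then none
      else some (dashRuns s) := by
  have hs2 : 2 ≤ s.length := by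
    have := List.length_filter_le (fun ch => decide (ch ≠ '-')) s
    omega
  have h0 : 0 < s.length := by omega
  have hcons : s = s[0] :: s.drop 1 := by
    have := List.drop_eq_getElem_cons (l := s) (i := 0) h0
    simpa using this
  rw [loopA]
  rw [dif_pos h0]
  by_cases hv0 : s[0] ∈ vA
  · -- boundary branch fires; altFail also fails at the first dash-free char
    rw [if_pos ⟨Or.inl rfl, hv0⟩]
    have hne : s[0] ≠ '-' := by intro h; rw [h] at hv0; simp [vA] at hv0
    have : s.filter (fun ch => ch ≠ '-') = s[0] :: (s.drop 1).filter (fun ch => ch ≠ '-') := by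
      conv_lhs => rw [hcons]
      rw [List.filter_cons, if_pos (by simpa using hne)]
    rw [this, altFail]
    simp [hv0]
  · rw [if_neg (by rintro ⟨_, hv⟩; exact hv0 hv)]
    by_cases hd0 : s[0] = '-'
    · rw [dif_pos hd0]
      have hgt := dashEnd_gt s 0 h0 hd0
      rw [loopA_spec s (dashEnd s 0) 0 _ hgt (by omega)]
      have hfilt : (s.drop (dashEnd s 0)).filter (fun ch => ch ≠ '-') =
          s.filter (fun ch => ch ≠ '-') := by
        rw [drop_dashEnd]
        simpa using filter_dropWhile s
      have hjlt : dashEnd s 0 < s.length := by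
        by_contra hno
        have hemp : s.filter (fun ch => ch ≠ '-') = [] := by
          rw [← hfilt, List.drop_eq_nil_of_le (by omega)]
          rfl
        rw [hemp] at hz
        simp at hz
      have hruns : dashRuns s = (dashEnd s 0 - 0) :: dashRuns (s.drop (dashEnd s 0)) := by
        conv_lhs => rw [hcons]
        have : dashRuns (s[0] :: s.drop 1) =
            (((s.drop 1).takeWhile (fun x => x = '-')).length + 1) ::
              dashRuns ((s.drop 1).dropWhile (fun x => x = '-')) := by
          rw [dashRuns]; simp [hd0]
        rw [this]
        congr 1
        · rw [dashEnd_eq s 0, List.drop_zero, hcons, List.takeWhile_cons]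
          simp [hd0]
        · rw [drop_dashEnd, List.drop_zero, hcons, List.dropWhile_cons]
          simp [hd0]
      rw [hfilt, hruns]
      simp [hjlt]
    · rw [dif_neg hd0, if_pos ⟨rfl, hv0⟩]
      rw [loopA_spec s 1 1 [] (by omega) (by omega)]
      have hz0 : s.filter (fun ch => ch ≠ '-') = s[0] :: (s.drop 1).filter (fun ch => ch ≠ '-') := by
        conv_lhs => rw [hcons]
        rw [List.filter_cons, if_pos (by simpa using hd0)]
      have haf : altFail (s.filter (fun ch => ch ≠ '-')) 0 =
          altFail ((s.drop 1).filter (fun ch => ch ≠ '-')) 1 := by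
        rw [hz0, altFail]; simp [hv0]
      have hruns : dashRuns s = dashRuns (s.drop 1) := by
        conv_lhs => rw [hcons]
        rw [dashRuns]; simp [hd0]
      rw [haf, hruns]
      simp [show 1 < s.length from by omega]

-- ===== VERDICT (by name: the statement is the Claim_ definition above) =====
theorem is_authentic_skewer_spec : Claim_equal_is_authentic_skewer := by
  intro n _
  show is_authentic_skewer n = is_authentic_skewer_alt n
  unfold is_authentic_skewer is_authentic_skewer_alt
  generalize n.toList = s
  by_cases hz : (s.filter (fun ch => ch ≠ '-')).length < 2
  · rw [if_pos hz, if_pos hz]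
  · rw [if_neg hz, if_neg hz, loopA_start s hz]
    have hne : s ≠ [] := by
      intro h
      rw [h] at hz; simp at hz
    -- B's head/last checks and enumerate check line up with altFail/vLast
    have hlast : decide (s.getLastD ' ' ∈ vB) = vLast s := rfl
    have hany : (PySem.List.enumerate (s.filter (fun ch => ch ≠ '-')) 0).any
        (fun p => decide (p.2 ∈ vB) != decide (PySem.Int.mod p.1 2 = 1)) =
        altFail (s.filter (fun ch => ch ≠ '-')) 0 := by
      rw [altFail_enum (s.filter (fun ch => ch ≠ '-')) 0 0 (by omega)]
      apply anyCongr
      intro p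
      rw [show p.1 + ((0:Nat):Int) - 0 = p.1 from by push_cast; ring]
    have hhead : s.headD ' ' ∈ vB → altFail (s.filter (fun ch => ch ≠ '-')) 0 = true := by
      intro hh
      cases s with
      | nil => simp at hne
      | cons a t =>
        simp only [List.headD_cons] at hh
        have hnd : a ≠ '-' := by intro h; rw [h] at hh; simp [vB] at hh
        rw [List.filter_cons, if_pos (by simpa using hnd), altFail]
        simp [show a ∈ vA from hh]
    by_cases hH : s.headD ' ' ∈ vB
    · have hA := hhead hH
      have c1 : (altFail (s.filter (fun ch => ch ≠ '-')) 0 || vLast s) = true := by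
        rw [hA, Bool.true_or]
      have c2 : (decide (s.headD ' ' ∈ vB) || decide (s.getLastD ' ' ∈ vB)) = true := by
        rw [decide_eq_true hH, Bool.true_or]
      rw [if_pos c1, if_pos c2]
    · by_cases hL : vLast s = true
      · have c1 : (altFail (s.filter (fun ch => ch ≠ '-')) 0 || vLast s) = true := by
          rw [hL, Bool.or_true]
        have c2 : (decide (s.headD ' ' ∈ vB) || decide (s.getLastD ' ' ∈ vB)) = true := by
          rw [hlast, hL, Bool.or_true]
        rw [if_pos c1, if_pos c2]
      · simp only [Bool.not_eq_true] at hL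
        have c2 : (decide (s.headD ' ' ∈ vB) || decide (s.getLastD ' ' ∈ vB)) = false := by
          rw [hlast, hL, decide_eq_false hH, Bool.false_or]
        rw [c2]
        simp only [Bool.false_eq_true, if_false]
        by_cases hA : altFail (s.filter (fun ch => ch ≠ '-')) 0 = true
        · have c1 : (altFail (s.filter (fun ch => ch ≠ '-')) 0 || vLast s) = true := by
            rw [hA, Bool.true_or]
          rw [if_pos c1, hany, hA]
          simp
        · simp only [Bool.not_eq_true] at hA
          have c1 : (altFail (s.filter (fun ch => ch ≠ '-')) 0 || vLast s) = false := by
            rw [hA, hL, Bool.or_false]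
          rw [if_neg (by rw [c1]; simp), hany, hA]
          simp [counter_size_eq]
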